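-- pv_equiv track=rewrite | github.com/JungKeunHee/Algorithm_Practice | 1st_week_practice/01_01_find_max_num_02.py | find_max_sequence_index
-- ===== SOURCE A (Python) =====
-- def find_max_sequence_index(array):
--     max_number = max(array)  # 리스트에서 최댓값 구하기
--
--     max_len = 0              # 최댓값 연속 길이
--     max_start_index = 0      # 최댓값 연속 시작 인덱스
--
--     i = 0
--     while i < len(array):
--         if array[i] == max_number:
--             start = i
--             length = 0
--             while i < len(array) and array[i] == max_number:
--                 length += 1
--                 i += 1
--             if length > max_len:
--                 max_len = length
--                 max_start_index = start
--         else: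
--             i += 1
--
--     return max_start_index
-- ===== SOURCE B (Python) =====
-- def find_max_sequence_index(array):
--     max_number = max(array)
--     max_len = 0
--     max_start_index = 0
--     cur = 0
--     for i, x in enumerate(array):
--         if x == max_number:
--             cur += 1
--             if cur > max_len:
--                 max_len = cur
--                 max_start_index = i - cur + 1
--         else:
--             cur = 0
--     return max_start_index
-- ===== Notes on version B (the rewrite author's own statement) =====
-- stated objective: simpler
-- what changed: Replaced A's nested inner while-loop that consumes whole runs with a single flat pass keeping a running count of the current run, updating the best start whenever the count first exceeds the best length.
import Mathlib
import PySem

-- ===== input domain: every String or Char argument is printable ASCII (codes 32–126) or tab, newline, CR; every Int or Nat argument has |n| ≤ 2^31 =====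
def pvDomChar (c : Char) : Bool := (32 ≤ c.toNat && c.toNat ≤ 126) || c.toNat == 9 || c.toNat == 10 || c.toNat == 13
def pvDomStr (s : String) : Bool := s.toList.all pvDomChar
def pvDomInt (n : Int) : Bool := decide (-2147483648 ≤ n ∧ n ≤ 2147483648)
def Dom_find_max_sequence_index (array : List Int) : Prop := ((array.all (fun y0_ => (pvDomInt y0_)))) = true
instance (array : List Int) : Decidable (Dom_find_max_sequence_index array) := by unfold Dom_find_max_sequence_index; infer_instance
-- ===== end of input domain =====

-- B replaces A's nested run-consuming inner while-loop by one flat pass with a reset-on-mismatch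
-- running counter (objective: simpler). Equivalence of RETURN values on nonempty lists.

-- ===== PORT A =====
-- inner while: 'while i < len(array) and array[i] == max_number: length += 1; i += 1' (returns length; i advances by it)
def pvInnerA (array : List Int) (m : Int) (i : Nat) : Nat :=
  if h : i < array.length ∧ array.getD i 0 = m then pvInnerA array m (i + 1) + 1 else 0
termination_by array.length - i
decreasing_by omega

-- the inner loop makes at least one step when its guard holds (needed for outer termination)
theorem pvInnerA_pos (array : List Int) (m : Int) (i : Nat)
    (h1 : i < array.length) (h2 : array.getD i 0 = m) : 1 ≤ pvInnerA array m i := by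
  rw [pvInnerA, dif_pos ⟨h1, h2⟩]; omega

-- outer while over i with state (max_len, max_start_index)
def pvOuterA (array : List Int) (m : Int) (i maxLen : Nat) (maxStart : Int) : Int :=
  if h : i < array.length then
    if hm : array.getD i 0 = m then
      let len := pvInnerA array m i
      if len > maxLen then pvOuterA array m (i + len) len (i : Int)
      else pvOuterA array m (i + len) maxLen maxStart
    else pvOuterA array m (i + 1) maxLen maxStart
  else maxStart
termination_by array.length - i
decreasing_by
  · have := pvInnerA_pos array m i h hm; omega
  · have := pvInnerA_pos array m i h hm; omega
  · omega

def find_max_sequence_index (array : List Int) : Int :=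
  match PySem.List.max? array (fun y => y) with
  | none => 0        -- Python raises ValueError on max([]); excluded by Pre_
  | some m => pvOuterA array m 0 0 0

-- ===== PORT B =====
-- 'for i, x in enumerate(array)' with state (max_len, cur, max_start_index)
def pvGoB (m : Int) (i : Nat) (l : List Int) (maxLen cur : Nat) (best : Int) : Int :=
  match l with
  | [] => best
  | x :: xs =>
    if x = m then
      if cur + 1 > maxLen then pvGoB m (i + 1) xs (cur + 1) (cur + 1) ((i : Int) - (cur + 1) + 1)
      else pvGoB m (i + 1) xs maxLen (cur + 1) best
    else pvGoB m (i + 1) xs maxLen 0 best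

def find_max_sequence_index_alt (array : List Int) : Int :=
  match PySem.List.max? array (fun y => y) with
  | none => 0        -- Python raises ValueError on max([]); excluded by Pre_
  | some m => pvGoB m 0 array 0 0 0

-- ===== PRECONDITION & SPEC =====
-- Pre_ excludes only the empty list, on which Python's max() raises ValueError (in both A and B).
def Pre_find_max_sequence_index (array : List Int) : Prop := array ≠ []
instance (array : List Int) : Decidable (Pre_find_max_sequence_index array) := by
  unfold Pre_find_max_sequence_index; infer_instance
def pvWitness_find_max_sequence_index : List Int := [1, 2, 2, 1, 2]

def Spec_find_max_sequence_index (array : List Int) (out : Int) : Prop := out = find_max_sequence_index_alt array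
instance (array : List Int) (out : Int) : Decidable (Spec_find_max_sequence_index array out) := by unfold Spec_find_max_sequence_index; infer_instance

-- ===== CLAIM (what is proved, stated in full; the proofs are below) =====
def Claim_equal_find_max_sequence_index : Prop := ∀ (array : List Int), Dom_find_max_sequence_index array → Pre_find_max_sequence_index array → Spec_find_max_sequence_index array (find_max_sequence_index array)

-- ===== LEMMAS AND PROOFS =====

-- drop i exposes array[i] at its head when i is in range
theorem pvDrop_cons (array : List Int) (i : Nat) (h : i < array.length) :
    array.drop i = array.getD i 0 :: array.drop (i + 1) := by
  rw [List.drop_eq_getElem_cons h, List.getD_eq_getElem _ _ h]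

-- after the inner loop, either the list is exhausted or the next element differs from m
theorem pvInnerA_stop (array : List Int) (m : Int) (i : Nat) :
    ¬ (i + pvInnerA array m i < array.length ∧ array.getD (i + pvInnerA array m i) 0 = m) := by
  induction hn : array.length - i using Nat.strong_induction_on generalizing i with
  | _ n ih =>
    by_cases h : i < array.length ∧ array.getD i 0 = m
    · rw [pvInnerA, dif_pos h]
      have hrec := ih (array.length - (i + 1)) (by omega) (i + 1) rfl
      have e : i + (pvInnerA array m (i + 1) + 1) = (i + 1) + pvInnerA array m (i + 1) := by omega
      rw [e]; exact hrec
    · rw [pvInnerA, dif_neg h]; simpa using h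

-- run lemma: B's fold over the maximal run of m starting at i, with current run length j
-- (run start s = i - j), reaches the end-of-run index with the stated state
theorem pvRunB (array : List Int) (m : Int) (i : Nat) (j L : Nat) (S : Int) (s : Nat)
    (hs : i = s + j) :
    pvGoB m i (array.drop i) (if j > L then j else L) j (if j > L then (s : Int) else S)
      = pvGoB m (i + pvInnerA array m i) (array.drop (i + pvInnerA array m i))
          (if j + pvInnerA array m i > L then j + pvInnerA array m i else L)
          (j + pvInnerA array m i)
          (if j + pvInnerA array m i > L then (s : Int) else S) := by
  induction hn : array.length - i using Nat.strong_induction_on generalizing i j with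
  | _ n ih =>
    by_cases h : i < array.length ∧ array.getD i 0 = m
    · rw [pvInnerA, dif_pos h]
      have e1 : i + (pvInnerA array m (i + 1) + 1) = (i + 1) + pvInnerA array m (i + 1) := by omega
      have e2 : j + (pvInnerA array m (i + 1) + 1) = (j + 1) + pvInnerA array m (i + 1) := by omega
      rw [e1, e2]
      rw [← ih (array.length - (i + 1)) (by omega) (i + 1) (j + 1) (by omega) rfl]
      rw [pvDrop_cons array i h.1]
      simp only [pvGoB, if_pos h.2]
      have hbest : (i : Int) - (j + 1) + 1 = (s : Int) := by omega
      by_cases hj : j + 1 > L <;> by_cases hj' : j > L <;>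
        simp only [hj, hj', hbest] <;> split_ifs <;> first | rfl | omega
    · rw [pvInnerA, dif_neg h]
      simp

-- main simulation: A's outer loop from index i equals B's flat loop from index i with cur = 0
theorem pvMain (array : List Int) (m : Int) (i : Nat) (L : Nat) (S : Int) :
    pvOuterA array m i L S = pvGoB m i (array.drop i) L 0 S := by
  induction hn : array.length - i using Nat.strong_induction_on generalizing i L S with
  | _ n ih =>
    by_cases h : i < array.length
    · by_cases hm : array.getD i 0 = m
      · have hrun := pvRunB array m i 0 L S i (by omega)
        simp only [Nat.zero_add, gt_iff_lt, Nat.not_lt_zero, if_false] at hrun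
        set k := pvInnerA array m i with hk
        have hk1 : 1 ≤ k := pvInnerA_pos array m i h hm
        have hstop := pvInnerA_stop array m i
        rw [← hk] at hstop
        rw [pvOuterA, dif_pos h, dif_pos hm, hrun]
        have hcomb : (if k > L then pvOuterA array m (i + k) k (i : Int)
              else pvOuterA array m (i + k) L S)
            = pvOuterA array m (i + k) (if k > L then k else L) (if k > L then (i : Int) else S) := by
          split_ifs <;> rfl
        rw [hcomb]
        by_cases h2 : i + k < array.length
        · have hne : array.getD (i + k) 0 ≠ m := fun he => hstop ⟨h2, he⟩
          rw [pvDrop_cons array (i + k) h2]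
          simp only [pvGoB, if_neg hne]
          rw [pvOuterA, dif_pos h2, dif_neg hne]
          exact ih (array.length - (i + k + 1)) (by omega) (i + k + 1) _ _ rfl
        · rw [List.drop_eq_nil_of_le (by omega)]
          rw [pvOuterA, dif_neg h2]
          rfl
      · rw [pvOuterA, dif_pos h, dif_neg hm]
        rw [pvDrop_cons array i h]
        simp only [pvGoB, if_neg hm]
        exact ih (array.length - (i + 1)) (by omega) (i + 1) L S rfl
    · rw [pvOuterA, dif_neg h, List.drop_eq_nil_of_le (by omega)]
      rfl

-- ===== VERDICT (by name: the statement is the Claim_ definition above) =====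
theorem find_max_sequence_index_spec : Claim_equal_find_max_sequence_index := by
  intro array _ hpre
  unfold Spec_find_max_sequence_index find_max_sequence_index find_max_sequence_index_alt
  cases hmx : PySem.List.max? array (fun y => y) with
  | none => rfl
  | some m => simpa using pvMain array m 0 0 0
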